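-- pv_equiv track=rewrite | github.com/uncscode/particula | docs/.assets/single_page_api_generator.py | parse_markdown_headings
-- ===== SOURCE A (Python) =====
-- def parse_markdown_headings(md_text: str):
--     """
--     Given the text of a Markdown file, find all headings that start with "## ".
--     For each heading:
--       - The heading text (after "## ") = function name
--       - The content extends until the next "## " or end of file.
--     Returns a list of (func_name, doc_content).
--     """
--     lines = md_text.split("\n")
--     results = []
--     current_func_name = None
--     current_content_lines = []
--
--     for line in lines:
--         if line.startswith("## "):
--             # If we were already capturing a previous function, store it
--             if current_func_name is not None:
--                 results.append(
--                     (current_func_name, "\n".join(current_content_lines))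
--                 )
--                 current_content_lines = []
--
--             # Start a new function heading
--             current_func_name = line[3:].strip()  # everything after '## '
--         else:
--             # If we are in a heading's content, add this line
--             if current_func_name is not None:
--                 current_content_lines.append(line)
--
--     # End of file: store the last one if present
--     if current_func_name is not None:
--         results.append((current_func_name, "\n".join(current_content_lines)))
--
--     return results
-- ===== SOURCE B (Python) =====
-- def parse_markdown_headings(md_text: str):
--     lines = md_text.split("\n")
--     n = len(lines)
--     out = []
--     i = 0
--     while i < n:
--         if lines[i].startswith("## "):
--             j = i + 1
--             while j < n and not lines[j].startswith("## "):
--                 j += 1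
--             out.append((lines[i][3:].strip(), "\n".join(lines[i + 1:j])))
--             i = j
--         else:
--             i += 1
--     return out
-- ===== Notes on version B (the rewrite author's own statement) =====
-- stated objective: alternative
-- what changed: Replaces A's streaming accumulate-then-flush loop (current name + pending content lines + final flush) with an index scan that, at each heading line, scans forward to the next heading and emits the heading name with a slice of the intervening lines.
import Mathlib
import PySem

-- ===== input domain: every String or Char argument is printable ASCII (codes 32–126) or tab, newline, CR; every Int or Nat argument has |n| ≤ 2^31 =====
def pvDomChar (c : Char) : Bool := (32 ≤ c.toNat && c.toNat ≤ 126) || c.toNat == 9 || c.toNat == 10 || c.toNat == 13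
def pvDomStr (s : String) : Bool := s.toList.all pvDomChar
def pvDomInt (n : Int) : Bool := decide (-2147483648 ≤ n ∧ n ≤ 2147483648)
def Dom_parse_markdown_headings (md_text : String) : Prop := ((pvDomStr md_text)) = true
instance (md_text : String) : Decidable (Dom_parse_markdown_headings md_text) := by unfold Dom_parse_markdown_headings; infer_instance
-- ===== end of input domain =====

-- B replaces A's streaming accumulate-then-flush loop by an index scan that slices
-- each heading's content out directly (objective: alternative decomposition, same cost).

-- ===== PORT A =====
-- one loop step of A: state = (results, current_func_name, current_content_lines)
def pvStepA (st : List (String × String) × Option String × List String) (line : String) :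
    List (String × String) × Option String × List String :=
  match st with
  | (results, currentName, currentLines) =>
    if PySem.Str.startswith line "## " then
      match currentName with
      | some n => (results ++ [(n, PySem.Str.join "\n" currentLines)],
                   some (PySem.Str.strip (PySem.Str.slice line (some 3) none)), [])
      | none => (results, some (PySem.Str.strip (PySem.Str.slice line (some 3) none)), [])
    else
      match currentName with
      | some _ => (results, currentName, currentLines ++ [line])
      | none => (results, currentName, currentLines)

-- A's end-of-file flush
def pvFlushA (st : List (String × String) × Option String × List String) : List (String × String) :=
  match st with
  | (results, some n, cur) => results ++ [(n, PySem.Str.join "\n" cur)]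
  | (results, none, _) => results

def parse_markdown_headings (md_text : String) : List (String × String) :=
  pvFlushA (((PySem.Str.split? md_text "\n").getD []).foldl pvStepA ([], none, []))

-- ===== PORT B =====
-- B's outer while-loop: at a heading, the inner j-scan is takeWhile/dropWhile of the
-- remaining lines (lines[i+1:j] = takeWhile, continue at i = j = dropWhile)
def pvGoB : List String → List (String × String)
  | [] => []
  | l :: rest =>
    if PySem.Str.startswith l "## " then
      (PySem.Str.strip (PySem.Str.slice l (some 3) none),
       PySem.Str.join "\n" (rest.takeWhile (fun x => !PySem.Str.startswith x "## ")))
        :: pvGoB (rest.dropWhile (fun x => !PySem.Str.startswith x "## "))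
    else pvGoB rest
termination_by l => l.length
decreasing_by
  · exact Nat.lt_succ_of_le (rest.length_dropWhile_le _)
  · simp

def parse_markdown_headings_alt (md_text : String) : List (String × String) :=
  pvGoB ((PySem.Str.split? md_text "\n").getD [])

-- ===== PRECONDITION & SPEC =====
def Spec_parse_markdown_headings (md_text : String) (out : List (String × String)) : Prop := out = parse_markdown_headings_alt md_text
instance (md_text : String) (out : List (String × String)) : Decidable (Spec_parse_markdown_headings md_text out) := by unfold Spec_parse_markdown_headings; infer_instance

-- ===== CLAIM (what is proved, stated in full; the proofs are below) =====
def Claim_equal_parse_markdown_headings : Prop := ∀ (md_text : String), Dom_parse_markdown_headings md_text → Spec_parse_markdown_headings md_text (parse_markdown_headings md_text)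

-- ===== LEMMAS AND PROOFS =====

-- while capturing heading n with pending content `cur`, A flushes cur ++ the lines up
-- to the next heading, then continues exactly as B does from that heading
theorem pvFold_some (lines : List String) :
    ∀ (res : List (String × String)) (n : String) (cur : List String),
    pvFlushA (lines.foldl pvStepA (res, some n, cur)) =
      res ++ (n, PySem.Str.join "\n" (cur ++ lines.takeWhile (fun x => !PySem.Str.startswith x "## ")))
        :: pvGoB (lines.dropWhile (fun x => !PySem.Str.startswith x "## ")) := by
  induction lines with
  | nil => intro res n cur; simp [pvFlushA, pvGoB]
  | cons l rest ih =>
    intro res n cur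
    by_cases h : PySem.Chars.startswith l.toList ['#', '#', ' '] = true
    · simp only [List.foldl_cons]
      rw [show pvStepA (res, some n, cur) l
            = (res ++ [(n, PySem.Str.join "\n" cur)],
               some (PySem.Str.strip (PySem.Str.slice l (some 3) none)), []) by
        simp [pvStepA, h]]
      rw [ih]
      simp [pvGoB, h]
    · simp only [List.foldl_cons]
      rw [show pvStepA (res, some n, cur) l = (res, some n, cur ++ [l]) by
        simp [pvStepA, h]]
      rw [ih]
      simp [h, List.append_assoc]

-- before the first heading A's state is inert, so A agrees with B's scan
theorem pvFold_none (lines : List String) :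
    ∀ (res : List (String × String)),
    pvFlushA (lines.foldl pvStepA (res, none, [])) = res ++ pvGoB lines := by
  induction lines with
  | nil => intro res; simp [pvFlushA, pvGoB]
  | cons l rest ih =>
    intro res
    by_cases h : PySem.Chars.startswith l.toList ['#', '#', ' '] = true
    · simp only [List.foldl_cons]
      rw [show pvStepA (res, none, []) l
            = (res, some (PySem.Str.strip (PySem.Str.slice l (some 3) none)), []) by
        simp [pvStepA, h]]
      rw [pvFold_some]
      simp [pvGoB, h]
    · simp only [List.foldl_cons]
      rw [show pvStepA (res, none, []) l = (res, none, []) by simp [pvStepA, h]]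
      rw [ih]
      simp [pvGoB, h]

-- ===== VERDICT (by name: the statement is the Claim_ definition above) =====
theorem parse_markdown_headings_spec : Claim_equal_parse_markdown_headings := by
  intro md _
  unfold Spec_parse_markdown_headings parse_markdown_headings parse_markdown_headings_alt
  simpa using pvFold_none ((PySem.Str.split? md "\n").getD []) []
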